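-- pv_equiv track=rewrite | github.com/sarishtshreshth0/plag_extract | Project_CodeNet_Python800/p03104/s270958365.py | g
-- ===== SOURCE A (Python) =====
-- def g(x):
--     if x <= 0:
--         return 0
--     tmp = x
--     n = 0
--     while tmp > 0:
--         tmp //= 2
--         n += 1
--     l = [0]*n
--     for i in range(n):
--         if i==0:
--             l[i] = 1 if x%4==1 or x%4==2 else 0
--         else:
--             l[i] = max(x%(1<<(i+1))-(1<<i)+1, 0)%2
--     return sum(l[i]*(2**i) for i in range(n))
-- ===== SOURCE B (Python) =====
-- def g(x):
--     # Closed form: A's output has bit 0 = bit0(x) XOR bit1(x); for odd x all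
--     # higher output bits are 0, for even x they equal x's own bits.
--     if x <= 0:
--         return 0
--     if x % 2:
--         return 1 - (x // 2) % 2
--     return x + (x // 2) % 2
-- ===== Notes on version B (the rewrite author's own statement) =====
-- stated objective: simpler
-- what changed: Replaced A's bit-length while-loop, per-bit list construction and weighted-sum pass by an O(1) closed form: the output's bit 0 is bit0(x) XOR bit1(x), and the higher bits equal x's own bits exactly when x is even, so g(x) = 1-(x//2)%2 for odd x and x+(x//2)%2 for even x.
import Mathlib
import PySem

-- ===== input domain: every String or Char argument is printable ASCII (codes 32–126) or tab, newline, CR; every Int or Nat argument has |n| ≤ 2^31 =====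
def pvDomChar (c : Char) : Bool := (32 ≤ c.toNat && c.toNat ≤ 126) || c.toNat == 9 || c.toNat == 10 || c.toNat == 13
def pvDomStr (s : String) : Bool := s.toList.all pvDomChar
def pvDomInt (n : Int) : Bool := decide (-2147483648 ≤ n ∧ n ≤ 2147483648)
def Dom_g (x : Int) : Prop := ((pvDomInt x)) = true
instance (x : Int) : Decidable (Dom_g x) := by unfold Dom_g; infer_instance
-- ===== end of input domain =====

-- B replaces A's bit-length loop, per-bit list and weighted sum by a closed form
-- (the output's bit 0 is bit0(x) XOR bit1(x); higher bits survive exactly for even x); objective: simpler.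

-- ===== PORT A =====
-- the 'while tmp > 0: tmp //= 2; n += 1' loop
def gLoop (tmp : Int) (n : Int) : Int :=
  if h : tmp > 0 then gLoop (PySem.Int.floordiv tmp 2) (n + 1) else n
termination_by tmp.toNat
decreasing_by
  rw [PySem.Int.floordiv_eq_ediv_of_pos (by omega : (0:Int) < 2)]
  omega

-- body of the 'for i in range(n)' loop: the value stored into l[i]
-- (Python's '1 << (i+1)' and '2 ** i' are ported as powers of two; i ≥ 0 throughout)
def gEntry (x i : Int) : Int :=
  if i = 0 then (if PySem.Int.mod x 4 = 1 ∨ PySem.Int.mod x 4 = 2 then 1 else 0)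
  else PySem.Int.mod (max (PySem.Int.mod x ((2:Int) ^ (i + 1).toNat) - (2:Int) ^ i.toNat + 1) 0) 2

def g (x : Int) : Int :=
  if x ≤ 0 then 0
  else
    let n := gLoop x 0
    let l := (PySem.List.pyRange 0 n 1).map (fun i => gEntry x i)
    (PySem.List.pyRange 0 n 1).foldl
      (fun acc i => acc + PySem.List.pyGetD l i 0 * (2:Int) ^ i.toNat) 0

-- ===== PORT B =====
def g_alt (x : Int) : Int :=
  if x ≤ 0 then 0
  else if PySem.Int.mod x 2 ≠ 0 then 1 - PySem.Int.mod (PySem.Int.floordiv x 2) 2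
  else x + PySem.Int.mod (PySem.Int.floordiv x 2) 2

-- ===== PRECONDITION & SPEC =====
def Spec_g (x : Int) (out : Int) : Prop := out = g_alt x
instance (x : Int) (out : Int) : Decidable (Spec_g x out) := by unfold Spec_g; infer_instance

-- ===== CLAIM (what is proved, stated in full; the proofs are below) =====
def Claim_equal_g : Prop := ∀ (x : Int), Dom_g x → Spec_g x (g x)

-- ===== LEMMAS AND PROOFS =====

-- A's while loop computes the bit length
theorem gLoop_eq (t k : Int) (ht : 0 < t) :
    gLoop t k = k + (PySem.Int.bitLength t : Int) := by
  induction hn : t.toNat using Nat.strong_induction_on generalizing t k with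
  | _ n ih =>
    rw [gLoop, dif_pos ht, PySem.Int.bitLength_of_pos ht]
    rw [PySem.Int.floordiv_eq_ediv_of_pos (by omega : (0:Int) < 2)]
    by_cases h2 : 0 < t / 2
    · rw [ih (t / 2).toNat (by omega) (t / 2) (k + 1) h2 rfl]
      push_cast; ring
    · have : t / 2 = 0 := by omega
      rw [this, gLoop, PySem.Int.bitLength_zero]
      norm_num

-- digit decomposition of x mod 2^(k+1)
theorem dec_lemma (x : Int) (hx : 0 ≤ x) (k : Nat) :
    x % (2:Int) ^ (k + 1) = x % 2 ^ k + 2 ^ k * ((x / 2 ^ k) % 2) := by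
  obtain ⟨m, rfl⟩ := Int.eq_ofNat_of_zero_le hx
  have h : m % 2 ^ (k + 1) = m % 2 ^ k + 2 ^ k * (m / 2 ^ k % 2) := by
    rw [pow_succ]; exact Nat.mod_mul
  exact_mod_cast h

-- the value A stores at positions i ≥ 1: x's bit i for even x, 0 for odd x
theorem gEntry_pos (x : Int) (hx : 0 < x) (k : Nat) (hk : 1 ≤ k) :
    gEntry x (k : Int) = if x % 2 = 0 then (x / 2 ^ k) % 2 else 0 := by
  have hk0 : ((k : Nat) : Int) ≠ 0 := by exact_mod_cast Nat.one_le_iff_ne_zero.mp hk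
  have e1 : (((k : Nat) : Int) + 1).toNat = k + 1 := by omega
  have e2 : (((k : Nat) : Int)).toNat = k := by simp
  unfold gEntry
  rw [if_neg hk0, e1, e2,
    PySem.Int.mod_eq_emod_of_pos (by positivity : (0:Int) < 2 ^ (k + 1)),
    PySem.Int.mod_eq_emod_of_pos (by omega : (0:Int) < 2)]
  have hp0 : (0:Int) < 2 ^ k := by positivity
  have hd := dec_lemma x (le_of_lt hx) k
  have hr0 : 0 ≤ x % 2 ^ k := Int.emod_nonneg x (by positivity)
  have hr1 : x % 2 ^ k < 2 ^ k := Int.emod_lt_of_pos x hp0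
  have hrp : x % 2 ^ k % 2 = x % 2 :=
    Int.emod_emod_of_dvd x (dvd_pow_self 2 (Nat.one_le_iff_ne_zero.mp hk))
  have hb : (x / 2 ^ k) % 2 = 0 ∨ (x / 2 ^ k) % 2 = 1 := by omega
  rw [hd]
  rcases hb with h | h <;> rw [h] <;> rw [max_def] <;> split_ifs <;> omega

-- the value A stores at position 0: bit0(x) XOR bit1(x)
theorem gEntry_zero (x : Int) :
    gEntry x 0 = if x % 2 = 0 then (x / 2) % 2 else 1 - (x / 2) % 2 := by
  unfold gEntry
  rw [if_pos rfl, PySem.Int.mod_eq_emod_of_pos (by omega : (0:Int) < 4)]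
  split_ifs <;> omega

-- the weighted sum of A's list, in closed form
theorem sum_lemma (x : Int) (hx : 0 < x) (N : Nat) (hN : 1 ≤ N) :
    ((List.range N).map (fun (k : Nat) => gEntry x (k : Int) * (2:Int) ^ k)).sum
      = if x % 2 = 0 then (x / 2) % 2 + x % ((2:Int) ^ N) else 1 - (x / 2) % 2 := by
  induction N, hN using Nat.le_induction with
  | base =>
    simp [gEntry_zero x]
    split_ifs <;> omega
  | succ N hN ih =>
    rw [List.range_succ, List.map_append, List.sum_append, ih]
    simp only [List.map_cons, List.map_nil, List.sum_cons, List.sum_nil]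
    rw [gEntry_pos x hx N hN, dec_lemma x (le_of_lt hx) N]
    split_ifs with h
    · ring
    · simp

-- A's summation loop over the stored list, as a sum over List.range
theorem foldl_form (x : Int) (N M : Nat) (hMN : M ≤ N) :
    (PySem.List.pyRange 0 (M : Int) 1).foldl
      (fun acc i => acc + PySem.List.pyGetD ((PySem.List.pyRange 0 (N : Int) 1).map (fun i => gEntry x i)) i 0 * (2:Int) ^ i.toNat) 0
    = ((List.range M).map (fun (k : Nat) => gEntry x (k : Int) * (2:Int) ^ k)).sum := by
  induction M with
  | zero => simp [PySem.List.pyRange_one_eq_nil]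
  | succ M ih =>
    have hcast : ((M + 1 : Nat) : Int) = (M : Int) + 1 := by push_cast; ring
    rw [hcast, PySem.List.pyRange_one_succ_right (by positivity), List.foldl_append,
      ih (by omega), List.range_succ, List.map_append, List.sum_append]
    simp only [List.foldl_cons, List.foldl_nil, List.map_cons, List.map_nil,
      List.sum_cons, List.sum_nil]
    rw [PySem.List.pyGetD_map_pyRange (fun i => gEntry x i) N M 0 (by omega)]
    simp

-- the positive branch of A equals the positive branch of B
theorem g_final (x : Int) (hx' : 0 < x) :
    (let n := gLoop x 0
     let l := (PySem.List.pyRange 0 n 1).map (fun i => gEntry x i)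
     (PySem.List.pyRange 0 n 1).foldl
       (fun acc i => acc + PySem.List.pyGetD l i 0 * (2:Int) ^ i.toNat) 0) = g_alt x := by
  have hn : gLoop x 0 = ((PySem.Int.bitLength x : Nat) : Int) := by
    rw [gLoop_eq x 0 hx']; ring
  have hN1 : 1 ≤ PySem.Int.bitLength x := by
    rw [PySem.Int.bitLength_of_pos hx']; omega
  have hlt : x < (2:Int) ^ PySem.Int.bitLength x := by
    have h := PySem.Int.lt_two_pow_bitLength x
    have h2 : ((2 ^ PySem.Int.bitLength x : Nat) : Int) = (2:Int) ^ PySem.Int.bitLength x := by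
      push_cast; ring
    omega
  simp only [hn]
  rw [foldl_form x _ _ le_rfl, sum_lemma x hx' _ hN1,
    Int.emod_eq_of_lt (le_of_lt hx') hlt]
  unfold g_alt
  rw [if_neg (show ¬ x ≤ 0 by omega),
    PySem.Int.mod_eq_emod_of_pos (by omega : (0:Int) < 2),
    PySem.Int.floordiv_eq_ediv_of_pos (by omega : (0:Int) < 2),
    PySem.Int.mod_eq_emod_of_pos (by omega : (0:Int) < 2)]
  split_ifs <;> omega

-- ===== VERDICT (by name: the statement is the Claim_ definition above) =====
theorem g_spec : Claim_equal_g := by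
  intro x _
  unfold Spec_g g
  by_cases hx : x ≤ 0
  · rw [if_pos hx]; unfold g_alt; rw [if_pos hx]
  · rw [if_neg hx]; exact g_final x (by omega)
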